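-- pv_equiv track=rewrite | github.com/pypi-data/pypi-mirror-71 | packages/phylogenetic-features/phylogenetic_features-0.1-py3-none-any.whl/phylogenetic/features.py | index_pd_node
-- ===== SOURCE A (Python) =====
-- WEIGTH = 2
--
-- def index_pd_node(hist):  # ok
--     """Esta função retorna o indice PDNode da imagem"""
--
--     somadistances = 0
--     num_especies = len(hist)
--
--     # calcula a distance de todas as especies para os demais, sempre conservando a menor de todas
--     for i in range(num_especies):
--         if hist[i] == 0:
--             continue
--         minimun = 9999999
--         for j in range(num_especies):
--             if hist[j] == 0:
--                 continue
--
--             if i == j: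
--                 continue
--
--             if j == 0:
--                 distance = WEIGTH*(j - i)
--             elif j < i:
--                 distance = WEIGTH*((i - j) + 1)
--             else:
--                 distance = WEIGTH*((j - i) + 1)
--
--             if distance < minimun:
--                 minimun = distance
--
--         somadistances += minimun
--
--     return somadistances
-- ===== SOURCE B (Python) =====
-- WEIGTH = 2
-- MAXDIST = 9999999
--
--
-- def _dist(i, j):
--     if j == 0:
--         return WEIGTH * (j - i)
--     return WEIGTH * (abs(i - j) + 1)
--
--
-- def _min_dist(species, zero_present, k, i):
--     """Minimum distance from species[k] == i to any other listed species.
--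
--     The distance to species 0 is WEIGTH*(0 - i), never larger than any other
--     distance, so the minimum is attained either at species 0 (when present)
--     or at an adjacent entry of the sorted index list.
--     """
--     best = MAXDIST
--     if k > 0:
--         best = min(best, _dist(i, species[k - 1]))
--     if k + 1 < len(species):
--         best = min(best, _dist(i, species[k + 1]))
--     if zero_present and i != 0:
--         best = min(best, _dist(i, 0))
--     return best
--
--
-- def index_pd_node(hist):
--     """Sum, over the nonzero species, of each one's minimum distance to
--     another nonzero species; one pass over the nonzero indices."""
--     species = [i for i, v in enumerate(hist) if v != 0]
--     zero_present = bool(species) and species[0] == 0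
--     return sum(_min_dist(species, zero_present, k, i)
--                for k, i in enumerate(species))
-- ===== Notes on version B (the rewrite author's own statement) =====
-- stated objective: faster
-- what changed: B collects the nonzero indices once and computes each species' minimum from at most three candidates (left neighbour, right neighbour, species 0 when present) in a single pass, instead of A's nested all-pairs minimum scan.
import Mathlib
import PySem

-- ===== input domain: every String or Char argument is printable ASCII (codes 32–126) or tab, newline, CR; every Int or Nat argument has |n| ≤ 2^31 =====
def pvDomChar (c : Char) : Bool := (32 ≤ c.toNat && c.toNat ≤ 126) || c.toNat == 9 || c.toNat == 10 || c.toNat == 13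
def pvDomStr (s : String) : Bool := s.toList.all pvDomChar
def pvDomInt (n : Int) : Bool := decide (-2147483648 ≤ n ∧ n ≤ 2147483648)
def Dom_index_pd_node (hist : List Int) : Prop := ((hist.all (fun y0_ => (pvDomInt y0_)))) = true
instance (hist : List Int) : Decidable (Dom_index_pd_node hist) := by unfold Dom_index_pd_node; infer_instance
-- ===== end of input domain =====

-- B replaces A's quadratic all-pairs minimum scan by a single pass over the nonzero
-- indices, taking each species' minimum over at most three candidates; objective: faster.


-- ===== PORT A =====
-- literal transliteration of A: the doubly nested scan over range(len(hist))
def index_pd_node (hist : List Int) : Int :=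
  let n : Int := PySem.List.len hist
  (PySem.List.pyRange 0 n 1).foldl (fun somadistances i =>
    if PySem.List.pyGetD hist i 0 = 0 then somadistances
    else
      let minimun : Int :=
        (PySem.List.pyRange 0 n 1).foldl (fun minimun j =>
          if PySem.List.pyGetD hist j 0 = 0 then minimun
          else if i = j then minimun
          else
            let distance : Int :=
              if j = 0 then 2 * (j - i)
              else if j < i then 2 * ((i - j) + 1)
              else 2 * ((j - i) + 1)
            if distance < minimun then distance else minimun) 9999999
      somadistances + minimun) 0

-- ===== PORT B =====
-- helper _dist of Source B
def pdDist (i j : Int) : Int :=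
  if j = 0 then 2 * (j - i) else 2 * (|i - j| + 1)

-- helper _min_dist of Source B: minimum over the (at most three) candidates
def pdBest (species : List Int) (zeroPresent : Bool) (k i : Int) : Int :=
  let best : Int := 9999999
  let best := if 0 < k then min best (pdDist i (PySem.List.pyGetD species (k - 1) 0)) else best
  let best := if k + 1 < PySem.List.len species then min best (pdDist i (PySem.List.pyGetD species (k + 1) 0)) else best
  if zeroPresent && decide (i ≠ 0) then min best (pdDist i 0) else best

-- transliteration of B: collect the nonzero indices once, then one pass
def index_pd_node_alt (hist : List Int) : Int :=
  let species := ((PySem.List.enumerate hist).filter (fun iv => decide (iv.2 ≠ 0))).map (fun iv => iv.1)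
  let zeroPresent : Bool := decide (species.head? = some 0)
  ((PySem.List.enumerate species).map (fun ki => pdBest species zeroPresent ki.1 ki.2)).sum

-- ===== PRECONDITION & SPEC =====
def Spec_index_pd_node (hist : List Int) (out : Int) : Prop := out = index_pd_node_alt hist
instance (hist : List Int) (out : Int) : Decidable (Spec_index_pd_node hist out) := by unfold Spec_index_pd_node; infer_instance

-- ===== CLAIM (what is proved, stated in full; the proofs are below) =====
def Claim_equal_index_pd_node : Prop := ∀ (hist : List Int), Dom_index_pd_node hist → Spec_index_pd_node hist (index_pd_node hist)

-- ===== LEMMAS AND PROOFS =====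

-- the nonzero-index list both programs are really about
def pdS (hist : List Int) : List Int :=
  ((PySem.List.enumerate hist).filter (fun iv => decide (iv.2 ≠ 0))).map (fun iv => iv.1)

-- A's distance formula, and A's inner-loop value phrased over a list of indices
def pdD (i j : Int) : Int :=
  if j = 0 then 2 * (j - i)
  else if j < i then 2 * ((i - j) + 1)
  else 2 * ((j - i) + 1)

def pdM (S : List Int) (i : Int) : Int :=
  (S.filter (fun j => !decide (i = j))).foldl (fun m j => min m (pdD i j)) 9999999

-- generic characterisations of a running-min fold
theorem pdFoldMin_eq_min (f : Int → Int) (l : List Int) (init x : Int) (hx : x ∈ l)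
    (hall : ∀ j ∈ l, f x ≤ f j) :
    l.foldl (fun m j => min m (f j)) init = min init (f x) := by
  have he : l.foldl (fun m j => min m (f j)) init = (l.map f).foldl min init := by
    rw [List.foldl_map]
  rw [he]
  have h1 := PySem.List.foldl_min_le (l.map f) init
  apply le_antisymm
  · exact le_min h1.1 (h1.2 (f x) (List.mem_map_of_mem hx))
  · rcases PySem.List.foldl_min_mem (l.map f) init with h | h
    · rw [h]; exact min_le_left _ _
    · rcases List.mem_map.mp h with ⟨j, hj, hje⟩
      rw [← hje]
      exact le_trans (min_le_right _ _) (hall j hj)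

theorem pdFoldMin_eq_init (f : Int → Int) (l : List Int) (init : Int)
    (hall : ∀ j ∈ l, init ≤ f j) :
    l.foldl (fun m j => min m (f j)) init = init := by
  have he : l.foldl (fun m j => min m (f j)) init = (l.map f).foldl min init := by
    rw [List.foldl_map]
  rw [he]
  have h1 := PySem.List.foldl_min_le (l.map f) init
  apply le_antisymm h1.1
  rcases PySem.List.foldl_min_mem (l.map f) init with h | h
  · rw [h]
  · rcases List.mem_map.mp h with ⟨j, hj, hje⟩
    rw [← hje]; exact hall j hj

-- pdM at i, where x is a nearest other member
theorem pdM_char (S : List Int) (i x : Int) (hx : x ∈ S) (hne : i ≠ x)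
    (hall : ∀ j ∈ S, j ≠ i → pdD i x ≤ pdD i j) :
    pdM S i = min 9999999 (pdD i x) := by
  unfold pdM
  apply pdFoldMin_eq_min
  · exact List.mem_filter.mpr ⟨hx, by simp [Ne.symm, hne]⟩
  · intro j hj
    rcases List.mem_filter.mp hj with ⟨hjS, hjne⟩
    simp at hjne
    exact hall j hjS (fun h => hjne (h.symm))

-- A's inner loop over an (index, value) pair list is the min-fold over the kept indices
theorem pdFoldMinPairs (i : Int) (E : List (Int × Int)) : ∀ init : Int,
    E.foldl (fun minimun iv =>
      if iv.2 = 0 then minimun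
      else if i = iv.1 then minimun
      else
        let distance : Int :=
          if iv.1 = 0 then 2 * (iv.1 - i)
          else if iv.1 < i then 2 * ((i - iv.1) + 1)
          else 2 * ((iv.1 - i) + 1)
        if distance < minimun then distance else minimun) init
    = (((E.filter (fun iv => decide (iv.2 ≠ 0))).map (fun iv => iv.1)).filter
        (fun j => !decide (i = j))).foldl (fun m j => min m (pdD i j)) init := by
  induction E with
  | nil => intro init; rfl
  | cons iv t ih =>
    intro init
    simp only [ne_eq, decide_not] at ih
    by_cases h1 : iv.2 = 0
    · simp [h1, ih]
    · by_cases h2 : i = iv.1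
      · subst h2; simp [h1, ih]
      · simp [h1, h2, ih]
        congr 1
        simp only [pdD, min_def]
        split_ifs <;> omega

-- A's outer loop over an (index, value) pair list sums f over the kept indices
theorem pdFoldSumPairs (f : Int → Int) (E : List (Int × Int)) : ∀ init : Int,
    E.foldl (fun s iv => if iv.2 = 0 then s else s + f iv.1) init
    = init + (((E.filter (fun iv => decide (iv.2 ≠ 0))).map (fun iv => iv.1)).map f).sum := by
  induction E with
  | nil => intro init; simp
  | cons iv t ih =>
    intro init
    by_cases h1 : iv.2 = 0
    · simp [h1, ih]
    · simp [h1, ih]; ring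

theorem pdInner_eq (hist : List Int) (i : Int) :
    (PySem.List.pyRange 0 (PySem.List.len hist) 1).foldl (fun minimun j =>
      if PySem.List.pyGetD hist j 0 = 0 then minimun
      else if i = j then minimun
      else
        let distance : Int :=
          if j = 0 then 2 * (j - i)
          else if j < i then 2 * ((i - j) + 1)
          else 2 * ((j - i) + 1)
        if distance < minimun then distance else minimun) 9999999
    = pdM (pdS hist) i := by
  refine Eq.trans ?_ (pdFoldMinPairs i (PySem.List.enumerate hist) 9999999)
  rw [PySem.List.enumerate_eq_map_pyRange hist 0, List.foldl_map]

theorem pdA_eq (hist : List Int) :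
    index_pd_node hist = ((pdS hist).map (pdM (pdS hist))).sum := by
  unfold index_pd_node
  simp only [pdInner_eq]
  rw [show (PySem.List.pyRange 0 (PySem.List.len hist) 1).foldl
        (fun s i => if PySem.List.pyGetD hist i 0 = 0 then s else s + pdM (pdS hist) i) 0
      = (PySem.List.enumerate hist).foldl
        (fun s iv => if iv.2 = 0 then s else s + pdM (pdS hist) iv.1) 0 from by
    rw [PySem.List.enumerate_eq_map_pyRange hist 0, List.foldl_map]]
  rw [pdFoldSumPairs]
  simp only [pdS, zero_add]

theorem pdB_eq (hist : List Int) :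
    index_pd_node_alt hist
      = ((PySem.List.enumerate (pdS hist)).map
          (fun ki => pdBest (pdS hist) (decide ((pdS hist).head? = some 0)) ki.1 ki.2)).sum := rfl

theorem pdS_sorted (hist : List Int) : (pdS hist).Pairwise (· < ·) := by
  unfold pdS
  exact ((PySem.List.pairwise_lt_enumerate hist 0).filter _).map _ (fun a b h => h)

theorem pdS_nonneg (hist : List Int) : ∀ x ∈ pdS hist, 0 ≤ x := by
  intro x hx
  unfold pdS at hx
  rcases List.mem_map.mp hx with ⟨iv, hiv, rfl⟩
  have h2 := (List.mem_filter.mp hiv).1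
  rcases (PySem.List.mem_enumerate_iff hist 0 iv).mp h2 with ⟨k, hk, rfl⟩
  simp

-- Source B's distance is A's distance
theorem pdDist_eq (i j : Int) : pdDist i j = pdD i j := by
  unfold pdDist pdD
  rcases abs_cases (i - j) with ⟨h1, h2⟩ | ⟨h1, h2⟩ <;> rw [h1] <;> split_ifs <;> omega

-- a member other than S[k] of a strictly increasing list lies at an index < k or > k
theorem pdSplit (S : List Int) (_hs : S.Pairwise (· < ·)) (k : Nat) (hk : k < S.length)
    (j : Int) (hj : j ∈ S) (hne : j ≠ S[k]) :
    (∃ m : Nat, m < k ∧ ∃ hm : m < S.length, S[m] = j) ∨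
    (∃ m : Nat, k < m ∧ ∃ hm : m < S.length, S[m] = j) := by
  obtain ⟨m, hm, he⟩ := List.mem_iff_getElem.mp hj
  rcases Nat.lt_trichotomy m k with h | h | h
  · exact Or.inl ⟨m, h, hm, he⟩
  · subst h; exact absurd he.symm hne
  · exact Or.inr ⟨m, h, hm, he⟩

-- the heart: at every position, B's three-candidate minimum is A's all-pairs minimum
theorem pdBest_eq_pdM (S : List Int) (hs : S.Pairwise (· < ·)) (hp : ∀ x ∈ S, 0 ≤ x)
    (k : Nat) (hk : k < S.length) :
    pdBest S (decide (S.head? = some 0)) (k : Int) S[k] = pdM S S[k] := by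
  have h0 : 0 < S.length := by omega
  have mono : ∀ (a b : Nat) (ha : a < S.length) (hb : b < S.length), a < b → S[a]'ha < S[b]'hb := by
    intro a b ha hb hab
    exact List.pairwise_iff_getElem.mp hs a b ha hb hab
  have hhead : S.head? = some (S[0]'h0) := by
    rw [List.head?_eq_getElem?]
    exact List.getElem?_eq_getElem h0
  have hmem : ∀ (m : Nat) (hm : m < S.length), S[m] ∈ S := fun m hm => List.getElem_mem hm
  have hi0 : 0 ≤ S[k] := hp _ (hmem k hk)
  unfold pdBest
  simp only [hhead, Option.some.injEq, Bool.and_eq_true, decide_eq_true_eq, PySem.List.len_eq,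
    pdDist_eq, ne_eq]
  by_cases hz : S[0]'h0 = 0 ∧ ¬S[k] = 0
  · -- species 0 is present and i ≠ 0: the minimum is the distance to species 0
    rw [if_pos hz]
    have hkpos : 0 < k := by
      by_contra h
      have hk0 : k = 0 := by omega
      subst hk0
      exact hz.2 hz.1
    have hipos : 0 < S[k] := by have := mono 0 k h0 hk hkpos; omega
    have hall : ∀ j ∈ S, j ≠ S[k] → pdD S[k] 0 ≤ pdD S[k] j := by
      intro j hj hjne
      have hj0 : 0 ≤ j := hp j hj
      unfold pdD; split_ifs <;> omega
    have hx0 : (0 : Int) ∈ S := by rw [← hz.1]; exact hmem 0 h0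
    rw [pdM_char S S[k] 0 hx0 (by omega) hall]
    have hl : PySem.List.pyGetD S ((k : Int) - 1) 0 = S[k-1]'(by omega) := by
      rw [show ((k : Int) - 1) = ((k - 1 : Nat) : Int) by omega, PySem.List.pyGetD_natCast]
      exact List.getD_eq_getElem S 0 (by omega)
    rw [if_pos (show (0 : Int) < (k : Int) by exact_mod_cast hkpos), hl]
    have hlne : S[k-1]'(by omega) ≠ S[k] := by have := mono (k-1) k (by omega) hk (by omega); omega
    have ha := hall _ (hmem (k-1) (by omega)) hlne
    have hc : pdD S[k] 0 = 2 * (0 - S[k]) := by unfold pdD; simp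
    by_cases hlen : k + 1 < S.length
    · have hr : PySem.List.pyGetD S ((k : Int) + 1) 0 = S[k+1]'(by omega) := by
        rw [show ((k : Int) + 1) = ((k + 1 : Nat) : Int) by omega, PySem.List.pyGetD_natCast]
        exact List.getD_eq_getElem S 0 (by omega)
      rw [if_pos (show (k : Int) + 1 < (S.length : Int) by exact_mod_cast hlen), hr]
      have hrne : S[k+1]'(by omega) ≠ S[k] := by have := mono k (k+1) (by omega) (by omega) (by omega); omega
      have hb := hall _ (hmem (k+1) (by omega)) hrne
      omega
    · rw [if_neg (show ¬((k : Int) + 1 < (S.length : Int)) by exact_mod_cast hlen)]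
      omega
  · rw [if_neg hz]
    by_cases hk0 : k = 0
    · subst hk0
      rw [if_neg (show ¬((0 : Int) < ((0 : Nat) : Int)) by simp)]
      by_cases hlen : 0 + 1 < S.length
      · have hr : PySem.List.pyGetD S (((0 : Nat) : Int) + 1) 0 = S[1]'(by omega) := by
          rw [show (((0 : Nat) : Int) + 1) = ((1 : Nat) : Int) by omega, PySem.List.pyGetD_natCast]
          exact List.getD_eq_getElem S 0 (by omega)
        rw [if_pos (show ((0 : Nat) : Int) + 1 < (S.length : Int) by exact_mod_cast hlen), hr]
        have h01 : S[0]'h0 < S[1]'(by omega) := mono 0 1 h0 (by omega) (by omega)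
        have hall : ∀ j ∈ S, j ≠ S[0]'h0 → pdD (S[0]'h0) (S[1]'(by omega)) ≤ pdD (S[0]'h0) j := by
          intro j hj hjne
          obtain ⟨m, hmk, hm, he⟩ | ⟨m, hmk, hm, he⟩ := pdSplit S hs 0 h0 j hj hjne
          · omega
          · have hj1 : S[1]'(by omega) ≤ j := by
              rcases Nat.lt_or_ge 1 m with h | h
              · have := mono 1 m (by omega) hm h; omega
              · have : m = 1 := by omega
                subst this; omega
            unfold pdD; split_ifs <;> omega
        rw [pdM_char S (S[0]'h0) (S[1]'(by omega)) (hmem 1 (by omega)) (by omega) hall]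
      · rw [if_neg (show ¬(((0 : Nat) : Int) + 1 < (S.length : Int)) by exact_mod_cast hlen)]
        unfold pdM
        rw [pdFoldMin_eq_init]
        intro j hj
        rcases List.mem_filter.mp hj with ⟨hjS, hjne⟩
        obtain ⟨m, hm, he⟩ := List.mem_iff_getElem.mp hjS
        have hm0 : m = 0 := by omega
        subst hm0
        simp only [Bool.not_eq_eq_eq_not, Bool.not_true, decide_eq_false_iff_not] at hjne
        exact absurd he hjne
    · -- k ≥ 1 and species 0 absent (or i = 0, impossible here): all indices positive
      have hkpos : 0 < k := by omega
      have hS0ne : S[0]'h0 ≠ 0 := by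
        intro h
        apply hz
        refine ⟨h, ?_⟩
        have := mono 0 k h0 hk hkpos; omega
      have hS0pos : 0 < S[0]'h0 := by have := hp _ (hmem 0 h0); omega
      have hposall : ∀ j ∈ S, 0 < j := by
        intro j hj
        obtain ⟨m, hm, he⟩ := List.mem_iff_getElem.mp hj
        rcases Nat.eq_zero_or_pos m with h | h
        · subst h; omega
        · have := mono 0 m h0 hm h; omega
      have hl : PySem.List.pyGetD S ((k : Int) - 1) 0 = S[k-1]'(by omega) := by
        rw [show ((k : Int) - 1) = ((k - 1 : Nat) : Int) by omega, PySem.List.pyGetD_natCast]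
        exact List.getD_eq_getElem S 0 (by omega)
      rw [if_pos (show (0 : Int) < (k : Int) by exact_mod_cast hkpos), hl]
      have hlk : S[k-1]'(by omega) < S[k] := mono (k-1) k (by omega) hk (by omega)
      have hlpos : 0 < S[k-1]'(by omega) := hposall _ (hmem (k-1) (by omega))
      have hjlel : ∀ (m : Nat) (hm : m < S.length) (hmk : m < k), S[m]'hm ≤ S[k-1]'(by omega) := by
        intro m hm hmk
        rcases Nat.lt_or_ge m (k-1) with h | h
        · have := mono m (k-1) (by omega) (by omega) h; omega
        · have : m = k - 1 := by omega
          subst this; omega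
      by_cases hlen : k + 1 < S.length
      · have hr : PySem.List.pyGetD S ((k : Int) + 1) 0 = S[k+1]'(by omega) := by
          rw [show ((k : Int) + 1) = ((k + 1 : Nat) : Int) by omega, PySem.List.pyGetD_natCast]
          exact List.getD_eq_getElem S 0 (by omega)
        rw [if_pos (show (k : Int) + 1 < (S.length : Int) by exact_mod_cast hlen), hr]
        have hkr : S[k] < S[k+1]'(by omega) := mono k (k+1) (by omega) (by omega) (by omega)
        have hrpos : 0 < S[k+1]'(by omega) := hposall _ (hmem (k+1) (by omega))
        have hjger : ∀ (m : Nat) (hm : m < S.length), k < m → S[k+1]'(by omega) ≤ S[m] := by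
          intro m hm hmk
          rcases Nat.lt_or_ge (k+1) m with h | h
          · have := mono (k+1) m (by omega) hm h; omega
          · have : m = k + 1 := by omega
            subst this; omega
        have hdl : pdD S[k] (S[k-1]'(by omega)) = 2 * ((S[k] - S[k-1]'(by omega)) + 1) := by
          unfold pdD; split_ifs <;> omega
        have hdr : pdD S[k] (S[k+1]'(by omega)) = 2 * ((S[k+1]'(by omega) - S[k]) + 1) := by
          unfold pdD; split_ifs <;> omega
        have hallboth : ∀ j ∈ S, j ≠ S[k] →
            pdD S[k] (S[k-1]'(by omega)) ≤ pdD S[k] j ∨ pdD S[k] (S[k+1]'(by omega)) ≤ pdD S[k] j := by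
          intro j hj hjne
          have hjpos := hposall j hj
          obtain ⟨m, hmk, hm, he⟩ | ⟨m, hmk, hm, he⟩ := pdSplit S hs k hk j hj hjne
          · left
            have := hjlel m hm hmk
            rw [hdl]; unfold pdD; split_ifs <;> omega
          · right
            have := hjger m hm hmk
            rw [hdr]; unfold pdD; split_ifs <;> omega
        by_cases hside : S[k] - S[k-1]'(by omega) ≤ S[k+1]'(by omega) - S[k]
        · have hall : ∀ j ∈ S, j ≠ S[k] → pdD S[k] (S[k-1]'(by omega)) ≤ pdD S[k] j := by
            intro j hj hjne
            rcases hallboth j hj hjne with h | h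
            · exact h
            · omega
          rw [pdM_char S S[k] (S[k-1]'(by omega)) (hmem (k-1) (by omega)) (by omega) hall]
          omega
        · have hall : ∀ j ∈ S, j ≠ S[k] → pdD S[k] (S[k+1]'(by omega)) ≤ pdD S[k] j := by
            intro j hj hjne
            rcases hallboth j hj hjne with h | h
            · omega
            · exact h
          rw [pdM_char S S[k] (S[k+1]'(by omega)) (hmem (k+1) (by omega)) (by omega) hall]
          omega
      · rw [if_neg (show ¬((k : Int) + 1 < (S.length : Int)) by exact_mod_cast hlen)]
        have hall : ∀ j ∈ S, j ≠ S[k] → pdD S[k] (S[k-1]'(by omega)) ≤ pdD S[k] j := by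
          intro j hj hjne
          have hjpos := hposall j hj
          obtain ⟨m, hmk, hm, he⟩ | ⟨m, hmk, hm, he⟩ := pdSplit S hs k hk j hj hjne
          · have := hjlel m hm hmk
            unfold pdD; split_ifs <;> omega
          · omega
        rw [pdM_char S S[k] (S[k-1]'(by omega)) (hmem (k-1) (by omega)) (by omega) hall]

theorem pdSum_eq (S : List Int) (hs : S.Pairwise (· < ·)) (hp : ∀ x ∈ S, 0 ≤ x) :
    ((PySem.List.enumerate S).map
        (fun ki => pdBest S (decide (S.head? = some 0)) ki.1 ki.2)).sum
      = (S.map (pdM S)).sum := by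
  apply congrArg List.sum
  apply List.ext_getElem
  · simp [PySem.List.length_enumerate]
  · intro n h1 h2
    simp only [List.getElem_map, PySem.List.getElem_enumerate, zero_add]
    exact pdBest_eq_pdM S hs hp n (by simpa using h2)

-- ===== VERDICT (by name: the statement is the Claim_ definition above) =====
theorem index_pd_node_spec : Claim_equal_index_pd_node := by
  intro hist _
  unfold Spec_index_pd_node
  rw [pdA_eq, pdB_eq, pdSum_eq (pdS hist) (pdS_sorted hist) (pdS_nonneg hist)]
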